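-- pv_equiv track=rewrite | github.com/ruppysuppy/Daily-Coding-Problem-Solutions | Solutions/298.py | get_longest_path_length
-- ===== SOURCE A (Python) =====
-- from typing import List
--
-- def get_longest_path_length(apples: List[int]) -> int:
--     curr_apples = {}
--     max_path = 0
--     start = 0
--     curr_apples[apples[start]] = 1
--     length = len(apples)
--     # moving the pointer to the position where the apple is not the same as the 1st
--     # apple in the array
--     for i in range(1, length):
--         if apples[i] in curr_apples:
--             curr_apples[apples[i]] += 1
--         else:
--             mismatch = i
--             break
--     else:
--         # only 1 type of apple present in the input
--         return length
--     curr_apples[apples[mismatch]] = 1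
--     # updating max_path to find the result
--     for i in range(mismatch + 1, length):
--         curr_apple = apples[i]
--         if curr_apple not in curr_apples:
--             max_path = max(max_path, i - start)
--             while len(curr_apples) > 1:
--                 curr_apples[apples[start]] -= 1
--                 if not curr_apples[apples[start]]:
--                     del curr_apples[apples[start]]
--                 start += 1
--             curr_apples[curr_apple] = 1
--         else:
--             curr_apples[curr_apple] += 1
--     max_path = max(max_path, length - start)
--     return max_path
-- ===== SOURCE B (Python) =====
-- from typing import List
--
-- def get_longest_path_length(apples: List[int]) -> int:
--     # constant-space sliding window: track the last two distinct types,
--     # the start of the current run, and the window start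
--     t1 = apples[0]   # IndexError on empty input, like A
--     t2 = t1
--     block_start = 0
--     start = 0
--     best = 1
--     for i in range(1, len(apples)):
--         a = apples[i]
--         if a != t1:
--             if a != t2 and t2 != t1:
--                 # third type: window restarts at the current run
--                 start = block_start
--             t2 = t1
--             t1 = a
--             block_start = i
--         if i - start + 1 > best:
--             best = i - start + 1
--     return best
-- ===== Notes on version B (the rewrite author's own statement) =====
-- stated objective: simpler
-- what changed: B replaces A's two-phase scan with a Counter dict and an inner while-loop that shrinks the window element by element by a single constant-space pass that tracks only the last two distinct apple types, the start of the current run and the window start, jumping the window start directly to the run start when a third type appears.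
import Mathlib
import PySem

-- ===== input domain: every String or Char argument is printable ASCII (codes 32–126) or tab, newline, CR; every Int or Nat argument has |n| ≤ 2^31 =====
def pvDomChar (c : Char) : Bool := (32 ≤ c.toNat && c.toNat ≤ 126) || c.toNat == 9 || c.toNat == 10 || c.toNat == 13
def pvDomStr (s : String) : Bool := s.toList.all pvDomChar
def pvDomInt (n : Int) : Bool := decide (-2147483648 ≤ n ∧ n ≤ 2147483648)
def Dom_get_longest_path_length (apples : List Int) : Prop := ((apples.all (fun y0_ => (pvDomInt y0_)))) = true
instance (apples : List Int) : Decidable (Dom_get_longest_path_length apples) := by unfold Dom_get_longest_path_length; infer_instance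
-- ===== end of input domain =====

-- B replaces A's Counter-dict sliding window (with its inner shrink loop) by a constant-space
-- scan that tracks only the last two distinct types, the current run start and the window start.

-- ===== PORT A =====
-- first for-loop of A: walk i over the remaining indices while apples[i] is a key of the
-- dict; return the dict and the break index (none = loop ran to the end)
def pvA_phase1 (apples : List Int) : List Int → PySem.Dict Int Int → PySem.Dict Int Int × Option Int
  | [], d => (d, none)
  | i :: rest, d =>
    if d.contains (PySem.List.pyGetD apples i 0) then
      pvA_phase1 apples rest (d.modify (PySem.List.pyGetD apples i 0) 0 (· + 1))
    else (d, some i)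

-- A's inner 'while len(curr_apples) > 1' loop; fuel makes it structural (always enough inside Pre_)
def pvA_shrink (apples : List Int) : Nat → PySem.Dict Int Int → Int → PySem.Dict Int Int × Int
  | 0, d, start => (d, start)
  | fuel+1, d, start =>
    if d.size > 1 then
      if (d.modify (PySem.List.pyGetD apples start 0) 0 (· - 1)).getD (PySem.List.pyGetD apples start 0) 0 = 0 then
        pvA_shrink apples fuel
          ((d.modify (PySem.List.pyGetD apples start 0) 0 (· - 1)).erase (PySem.List.pyGetD apples start 0)) (start + 1)
      else
        pvA_shrink apples fuel (d.modify (PySem.List.pyGetD apples start 0) 0 (· - 1)) (start + 1)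
    else (d, start)

-- A's second for-loop: state (dict, max_path, start)
def pvA_main (apples : List Int) : List Int → PySem.Dict Int Int → Int → Int → PySem.Dict Int Int × Int × Int
  | [], d, maxp, start => (d, maxp, start)
  | i :: rest, d, maxp, start =>
    if (d.contains (PySem.List.pyGetD apples i 0)) = false then
      pvA_main apples rest
        ((pvA_shrink apples apples.length d start).1.insert (PySem.List.pyGetD apples i 0) 1)
        (max maxp (i - start))
        (pvA_shrink apples apples.length d start).2
    else
      pvA_main apples rest (d.modify (PySem.List.pyGetD apples i 0) 0 (· + 1)) maxp start

def get_longest_path_length (apples : List Int) : Int :=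
  match PySem.List.pyGet? apples 0 with
  | none => 0   -- Python raises IndexError on empty input here; excluded by Pre_
  | some a0 =>
    match pvA_phase1 apples (PySem.List.pyRange 1 (PySem.List.len apples) 1)
            ((PySem.Dict.empty : PySem.Dict Int Int).insert a0 1) with
    | (_, none) => PySem.List.len apples     -- only 1 type of apple present
    | (d1, some mismatch) =>
      let r := pvA_main apples
        (PySem.List.pyRange (mismatch + 1) (PySem.List.len apples) 1)
        (d1.insert (PySem.List.pyGetD apples mismatch 0) 1) 0 0
      max r.2.1 (PySem.List.len apples - r.2.2)

-- ===== PORT B =====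
-- one pass, state (t1 = type of the current run, t2 = the other tracked type, bs = current
-- run start, start = window start, best)
def pvB_loop (apples : List Int) : List Int → Int → Int → Int → Int → Int → Int
  | [], _, _, _, _, best => best
  | i :: rest, t1, t2, bs, start, best =>
    pvB_loop apples rest
      (if PySem.List.pyGetD apples i 0 ≠ t1 then PySem.List.pyGetD apples i 0 else t1)
      (if PySem.List.pyGetD apples i 0 ≠ t1 then t1 else t2)
      (if PySem.List.pyGetD apples i 0 ≠ t1 then i else bs)
      (if PySem.List.pyGetD apples i 0 ≠ t1 ∧ PySem.List.pyGetD apples i 0 ≠ t2 ∧ t2 ≠ t1 then bs else start)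
      (if best < i - (if PySem.List.pyGetD apples i 0 ≠ t1 ∧ PySem.List.pyGetD apples i 0 ≠ t2 ∧ t2 ≠ t1 then bs else start) + 1
       then i - (if PySem.List.pyGetD apples i 0 ≠ t1 ∧ PySem.List.pyGetD apples i 0 ≠ t2 ∧ t2 ≠ t1 then bs else start) + 1
       else best)

def get_longest_path_length_alt (apples : List Int) : Int :=
  match PySem.List.pyGet? apples 0 with
  | none => 0   -- Python raises IndexError on empty input here; excluded by Pre_
  | some t1 => pvB_loop apples (PySem.List.pyRange 1 (PySem.List.len apples) 1) t1 t1 0 0 1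

-- ===== PRECONDITION & SPEC =====
-- Pre_ excludes only the empty list, on which A (and B) raise IndexError reading the first element
def Pre_get_longest_path_length (apples : List Int) : Prop := apples ≠ []
instance (apples : List Int) : Decidable (Pre_get_longest_path_length apples) := by unfold Pre_get_longest_path_length; infer_instance
def pvWitness_get_longest_path_length : List Int := [1, 2, 1, 3]

def Spec_get_longest_path_length (apples : List Int) (out : Int) : Prop := out = get_longest_path_length_alt apples
instance (apples : List Int) (out : Int) : Decidable (Spec_get_longest_path_length apples out) := by unfold Spec_get_longest_path_length; infer_instance

-- ===== CLAIM (what is proved, stated in full; the proofs are below) =====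
def Claim_equal_get_longest_path_length : Prop := ∀ (apples : List Int), Dom_get_longest_path_length apples → Pre_get_longest_path_length apples → Spec_get_longest_path_length apples (get_longest_path_length apples)

-- ===== LEMMAS AND PROOFS =====
-- occurrence count of t among apples[lo:hi] (indices read as the ports read them)
def pvCnt (a : List Int) (t lo hi : Int) : Int :=
  (((PySem.List.pyRange lo hi 1).map (fun k => PySem.List.pyGetD a k 0)).count t : Int)

lemma pvCnt_nil (a : List Int) (t lo hi : Int) (h : hi ≤ lo) : pvCnt a t lo hi = 0 := by
  simp [pvCnt, PySem.List.pyRange_one_eq_nil h]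

lemma pvCnt_nonneg (a : List Int) (t lo hi : Int) : 0 ≤ pvCnt a t lo hi :=
  Int.natCast_nonneg _

lemma pvCnt_cons (a : List Int) (t lo hi : Int) (h : lo < hi) :
    pvCnt a t lo hi = (if PySem.List.pyGetD a lo 0 = t then 1 else 0) + pvCnt a t (lo + 1) hi := by
  rw [pvCnt, PySem.List.pyRange_one_cons h]
  by_cases h' : PySem.List.pyGetD a lo 0 = t <;>
    simp [List.count_cons, h', eq_comm, pvCnt] <;> push_cast <;> ring

lemma pvCnt_snoc (a : List Int) (t lo hi : Int) (h : lo ≤ hi) :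
    pvCnt a t lo (hi + 1) = pvCnt a t lo hi + (if PySem.List.pyGetD a hi 0 = t then 1 else 0) := by
  rw [pvCnt, PySem.List.pyRange_one_succ_right h]
  by_cases h' : PySem.List.pyGetD a hi 0 = t <;>
    simp [List.count_append, List.count_cons, h', eq_comm, pvCnt] <;> push_cast <;> ring

lemma pvCnt_split (a : List Int) (t lo mid hi : Int) (h1 : lo ≤ mid) (h2 : mid ≤ hi) :
    pvCnt a t lo hi = pvCnt a t lo mid + pvCnt a t mid hi := by
  rw [pvCnt, PySem.List.pyRange_one_append lo mid hi h1 h2]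
  simp [List.count_append, pvCnt]

lemma pvCnt_all (a : List Int) (t : Int) :
    ∀ (k : Nat) (lo hi : Int), hi - lo = k →
      (∀ x, lo ≤ x → x < hi → PySem.List.pyGetD a x 0 = t) → pvCnt a t lo hi = hi - lo
  | 0, lo, hi, hk, _ => by rw [pvCnt_nil a t lo hi (by omega)]; omega
  | k+1, lo, hi, hk, hall => by
      rw [pvCnt_cons a t lo hi (by omega), if_pos (hall lo le_rfl (by omega)),
          pvCnt_all a t k (lo + 1) hi (by omega) (fun x hx1 hx2 => hall x (by omega) hx2)]
      omega

lemma pvCnt_all_ne (a : List Int) (t t' : Int) (hne : t' ≠ t) :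
    ∀ (k : Nat) (lo hi : Int), hi - lo = k →
      (∀ x, lo ≤ x → x < hi → PySem.List.pyGetD a x 0 = t) → pvCnt a t' lo hi = 0
  | 0, lo, hi, hk, _ => pvCnt_nil a t' lo hi (by omega)
  | k+1, lo, hi, hk, hall => by
      rw [pvCnt_cons a t' lo hi (by omega),
          if_neg (by rw [hall lo le_rfl (by omega)]; exact fun h => hne h.symm),
          pvCnt_all_ne a t t' hne k (lo + 1) hi (by omega) (fun x hx1 hx2 => hall x (by omega) hx2)]
      omega

lemma pvCnt_pos (a : List Int) (t lo hi k : Int) (h1 : lo ≤ k) (h2 : k < hi)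
    (hg : PySem.List.pyGetD a k 0 = t) : 1 ≤ pvCnt a t lo hi := by
  have hmem : t ∈ (PySem.List.pyRange lo hi 1).map (fun k => PySem.List.pyGetD a k 0) :=
    List.mem_map.mpr ⟨k, (PySem.List.mem_pyRange_one).mpr ⟨h1, h2⟩, hg⟩
  have := List.count_pos_iff.mpr hmem
  simp only [pvCnt]; omega
-- a two-entry dict with keys x, y (in either insertion order) and values cx, cy
def pvPair (d : PySem.Dict Int Int) (x y cx cy : Int) : Prop :=
  d = PySem.Dict.mk [(x, cx), (y, cy)] ∨ d = PySem.Dict.mk [(y, cy), (x, cx)]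

lemma pvPair_symm {d : PySem.Dict Int Int} {x y cx cy : Int}
    (hp : pvPair d x y cx cy) : pvPair d y x cy cx := hp.symm

lemma pvPair_size {d : PySem.Dict Int Int} {x y cx cy : Int}
    (hp : pvPair d x y cx cy) : d.size = 2 := by
  rcases hp with h | h <;> subst h <;> simp [PySem.Dict.size]

lemma pvPair_contains {d : PySem.Dict Int Int} {x y cx cy : Int}
    (hp : pvPair d x y cx cy) : d.contains x = true := by
  rcases hp with h | h <;> subst h <;> simp [PySem.Dict.contains_mk]

lemma pvPair_not_contains {d : PySem.Dict Int Int} {x y cx cy z : Int}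
    (hp : pvPair d x y cx cy) (hzx : z ≠ x) (hzy : z ≠ y) : d.contains z = false := by
  rcases hp with h | h <;> subst h <;>
    simp [PySem.Dict.contains_mk, Ne.symm hzx, Ne.symm hzy]

lemma pvPair_getD {d : PySem.Dict Int Int} {x y cx cy : Int} (hne : x ≠ y)
    (hp : pvPair d x y cx cy) : d.getD x 0 = cx := by
  rcases hp with h | h <;> subst h <;>
    simp [PySem.Dict.getD_eq_get?_getD, PySem.Dict.get?_mk_cons, hne, Ne.symm hne]

lemma pvPair_modify {d : PySem.Dict Int Int} {x y cx cy : Int} (hne : x ≠ y)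
    (hp : pvPair d x y cx cy) (f : Int → Int) :
    pvPair (d.modify x 0 f) x y (f cx) cy := by
  rcases hp with h | h <;> subst h
  · left
    simp [PySem.Dict.modify, PySem.Dict.ext_iff, PySem.Dict.items_insert,
          PySem.Dict.getD_eq_get?_getD, PySem.Dict.get?_mk_cons, hne, Ne.symm hne]
  · right
    simp [PySem.Dict.modify, PySem.Dict.ext_iff, PySem.Dict.items_insert,
          PySem.Dict.getD_eq_get?_getD, PySem.Dict.get?_mk_cons, hne, Ne.symm hne]

lemma pvPair_erase {d : PySem.Dict Int Int} {x y cx cy : Int} (hne : x ≠ y)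
    (hp : pvPair d x y cx cy) : d.erase x = PySem.Dict.mk [(y, cy)] := by
  rcases hp with h | h <;> subst h <;>
    simp [PySem.Dict.erase, PySem.Dict.ext_iff, hne, Ne.symm hne]

lemma pvPair_of_insert {x c : Int} (cx : Int) (hne : c ≠ x) :
    pvPair ((PySem.Dict.mk [(x, cx)]).insert c 1) x c cx 1 := by
  left
  simp [PySem.Dict.ext_iff, PySem.Dict.items_insert, PySem.Dict.contains_mk, Ne.symm hne]
-- A's shrink loop moves start to the start bs of the last run and leaves the dict holding
-- only the run's type t1 with its count over [bs, j)
lemma pv_shrink_eq (a : List Int) (j bs t1 t2 : Int)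
    (hbsj : bs < j) (hrun : ∀ k, bs ≤ k → k < j → PySem.List.pyGetD a k 0 = t1)
    (hprev : PySem.List.pyGetD a (bs - 1) 0 = t2) (hne : t1 ≠ t2) :
    ∀ (fuel : Nat) (s : Int) (d : PySem.Dict Int Int),
      s ≤ bs → (bs - s).toNat < fuel →
      (∀ k, s ≤ k → k < j → PySem.List.pyGetD a k 0 = t1 ∨ PySem.List.pyGetD a k 0 = t2) →
      (s < bs → pvPair d t2 t1 (pvCnt a t2 s j) (pvCnt a t1 s j)) →
      (s = bs → d = PySem.Dict.mk [(t1, pvCnt a t1 bs j)]) →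
      pvA_shrink a fuel d s = (PySem.Dict.mk [(t1, pvCnt a t1 bs j)], bs)
  | 0, s, d, hsbs, hfuel, _, _, _ => absurd hfuel (by omega)
  | fuel+1, s, d, hsbs, hfuel, h5, hd2, hd1 => by
    rcases eq_or_lt_of_le hsbs with heq | hlt
    · -- s = bs : dict is a singleton, the loop stops
      rw [hd1 heq, pvA_shrink]
      simp [PySem.Dict.size, heq]
    · -- s < bs : pop apples[s]
      have hp := hd2 hlt
      have hcons1 : pvCnt a t1 s j = (if PySem.List.pyGetD a s 0 = t1 then 1 else 0) + pvCnt a t1 (s + 1) j :=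
        pvCnt_cons a t1 s j (by omega)
      have hcons2 : pvCnt a t2 s j = (if PySem.List.pyGetD a s 0 = t2 then 1 else 0) + pvCnt a t2 (s + 1) j :=
        pvCnt_cons a t2 s j (by omega)
      have hrunlen : pvCnt a t1 bs j = j - bs := pvCnt_all a t1 (j - bs).toNat bs j (by omega) hrun
      rw [pvA_shrink, if_pos (by rw [pvPair_size hp]; norm_num)]
      rcases h5 s le_rfl (by omega) with hg | hg <;> rw [hg]
      · -- apples[s] = t1 : decrement t1's count; it stays positive, nothing is deleted
        have hs_ne : s ≠ bs - 1 := by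
          intro h; apply hne; rw [← hg, h, hprev]
        have hpos : 1 ≤ pvCnt a t1 (s + 1) j := by
          have hsplit : pvCnt a t1 (s + 1) j = pvCnt a t1 (s + 1) bs + pvCnt a t1 bs j :=
            pvCnt_split a t1 (s + 1) bs j (by omega) (by omega)
          have := pvCnt_nonneg a t1 (s + 1) bs
          omega
        have hc1' : pvCnt a t1 s j - 1 = pvCnt a t1 (s + 1) j := by
          rw [hcons1, if_pos hg]; ring
        have hc2' : pvCnt a t2 (s + 1) j = pvCnt a t2 s j := by
          rw [hcons2, if_neg (by rw [hg]; exact hne)]; ring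
        have hp' : pvPair (d.modify t1 0 (· - 1)) t2 t1
            (pvCnt a t2 (s + 1) j) (pvCnt a t1 (s + 1) j) := by
          rw [← hc1', hc2']
          exact pvPair_symm (pvPair_modify hne (pvPair_symm hp) _)
        rw [pvPair_getD hne (pvPair_symm hp'), if_neg (by omega)]
        exact pv_shrink_eq a j bs t1 t2 hbsj hrun hprev hne fuel (s + 1) _
          (by omega) (by omega) (fun k hk1 hk2 => h5 k (by omega) hk2)
          (fun _ => hp') (fun h => absurd h (by omega))
      · -- apples[s] = t2 : decrement t2's count; it is deleted exactly at s = bs - 1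
        have hc2' : pvCnt a t2 s j - 1 = pvCnt a t2 (s + 1) j := by
          rw [hcons2, if_pos hg]; ring
        have hc1' : pvCnt a t1 (s + 1) j = pvCnt a t1 s j := by
          rw [hcons1, if_neg (by rw [hg]; exact Ne.symm hne)]; ring
        have hp' : pvPair (d.modify t2 0 (· - 1)) t2 t1
            (pvCnt a t2 (s + 1) j) (pvCnt a t1 (s + 1) j) := by
          rw [← hc2', hc1']
          exact pvPair_modify (Ne.symm hne) hp _
        rw [pvPair_getD (Ne.symm hne) hp']
        rcases eq_or_lt_of_le (show s + 1 ≤ bs by omega) with heq2 | hlt2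
        · -- s = bs - 1 : t2's count hits 0, it is deleted, only t1 remains
          have hz : pvCnt a t2 (s + 1) j = 0 := by
            rw [heq2]; exact pvCnt_all_ne a t1 t2 (Ne.symm hne) (j - bs).toNat bs j (by omega) hrun
          rw [if_pos hz, pvPair_erase (Ne.symm hne) hp']
          exact pv_shrink_eq a j bs t1 t2 hbsj hrun hprev hne fuel (s + 1) _
            (by omega) (by omega) (fun k hk1 hk2 => h5 k (by omega) hk2)
            (fun h => absurd h (by omega))
            (fun _ => by rw [heq2])
        · -- s < bs - 1 : t2 still occurs at bs - 1, no deletion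
          have hpos : 1 ≤ pvCnt a t2 (s + 1) j :=
            pvCnt_pos a t2 (s + 1) j (bs - 1) (by omega) (by omega) hprev
          rw [if_neg (by omega)]
          exact pv_shrink_eq a j bs t1 t2 hbsj hrun hprev hne fuel (s + 1) _
            (by omega) (by omega) (fun k hk1 hk2 => h5 k (by omega) hk2)
            (fun _ => hp') (fun h => absurd h (by omega))
-- joint simulation of A's second loop and B's loop from a matched state:
-- window [s, j), run of t1 from bs, other tracked type t2, dict = counts of the window,
-- best = max maxp (j - s)
lemma pv_main_eq (a : List Int) :
    ∀ (fuel : Nat) (j s bs t1 t2 maxp best : Int) (d : PySem.Dict Int Int),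
      ((a.length : Int) - j).toNat ≤ fuel →
      0 ≤ s → s < bs → bs < j → j ≤ (a.length : Int) →
      (∀ k, bs ≤ k → k < j → PySem.List.pyGetD a k 0 = t1) →
      PySem.List.pyGetD a (bs - 1) 0 = t2 → t1 ≠ t2 →
      (∀ k, s ≤ k → k < j → PySem.List.pyGetD a k 0 = t1 ∨ PySem.List.pyGetD a k 0 = t2) →
      pvPair d t2 t1 (pvCnt a t2 s j) (pvCnt a t1 s j) →
      best = max maxp (j - s) →
      max (pvA_main a (PySem.List.pyRange j (a.length : Int) 1) d maxp s).2.1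
          ((a.length : Int) - (pvA_main a (PySem.List.pyRange j (a.length : Int) 1) d maxp s).2.2)
        = pvB_loop a (PySem.List.pyRange j (a.length : Int) 1) t1 t2 bs s best
  | fuel, j, s, bs, t1, t2, maxp, best, d, hfuel, hs0, hsbs, hbsj, hjn,
      hrun, hprev, hne, h5, hp, hbest => by
    rcases eq_or_lt_of_le hjn with heq | hlt
    · -- j = n : both loops are done
      rw [PySem.List.pyRange_one_eq_nil (le_of_eq heq.symm), pvA_main, pvB_loop, hbest, heq]
    · -- j < n : one more index
      match fuel, hfuel with
      | 0, hfuel => exact absurd hfuel (by omega)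
      | fuel+1, hfuel => ?_
      rw [PySem.List.pyRange_one_cons hlt, pvA_main, pvB_loop]
      have hsnoc1 : pvCnt a t1 s (j + 1) =
          pvCnt a t1 s j + (if PySem.List.pyGetD a j 0 = t1 then 1 else 0) :=
        pvCnt_snoc a t1 s j (by omega)
      have hsnoc2 : pvCnt a t2 s (j + 1) =
          pvCnt a t2 s j + (if PySem.List.pyGetD a j 0 = t2 then 1 else 0) :=
        pvCnt_snoc a t2 s j (by omega)
      by_cases hc1 : PySem.List.pyGetD a j 0 = t1
      · -- same type as the current run: both windows just extend
        rw [if_neg (by simp [hc1, pvPair_contains (pvPair_symm hp)])]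
        rw [hc1]
        simp only [ne_eq, not_true_eq_false, false_and, if_false, ite_self, if_neg (not_not_intro rfl)]
        have := pv_main_eq a fuel (j + 1) s bs t1 t2 maxp
          (if best < j - s + 1 then j - s + 1 else best)
          (d.modify t1 0 (· + 1))
          (by omega) hs0 hsbs (by omega) (by omega)
          (fun k hk1 hk2 => by
            rcases eq_or_lt_of_le (show k ≤ j by omega) with h | h
            · rw [h, hc1]
            · exact hrun k hk1 (by omega))
          hprev hne
          (fun k hk1 hk2 => by
            rcases eq_or_lt_of_le (show k ≤ j by omega) with h | h
            · rw [h, hc1]; exact Or.inl rfl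
            · exact h5 k hk1 (by omega))
          (by
            have h' := pvPair_modify hne (pvPair_symm hp) (· + 1)
            rw [hsnoc1, hsnoc2, if_pos hc1, if_neg (by rw [hc1]; exact hne)]
            simpa using pvPair_symm h')
          (by rw [hbest]; split_ifs <;> omega)
        exact this
      · by_cases hc2 : PySem.List.pyGetD a j 0 = t2
        · -- the other tracked type returns: it becomes the new run, roles swap
          rw [if_neg (by simp [hc2, pvPair_contains hp])]
          rw [hc2]
          simp only [ne_eq, if_pos (Ne.symm hne), not_true_eq_false, and_false, false_and, if_false,
            if_neg (not_not_intro rfl)]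
          have := pv_main_eq a fuel (j + 1) s j t2 t1 maxp
            (if best < j - s + 1 then j - s + 1 else best)
            (d.modify t2 0 (· + 1))
            (by omega) hs0 (by omega) (by omega) (by omega)
            (fun k hk1 hk2 => by
              have : k = j := by omega
              rw [this, hc2])
            (by
              have : j - 1 < j := by omega
              rw [hrun (j - 1) (by omega) this])
            (Ne.symm hne)
            (fun k hk1 hk2 => by
              rcases eq_or_lt_of_le (show k ≤ j by omega) with h | h
              · rw [h, hc2]; exact Or.inl rfl
              · exact (h5 k hk1 (by omega)).symm)
            (by
              have h' := pvPair_modify (Ne.symm hne) hp (· + 1)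
              rw [hsnoc1, hsnoc2, if_pos hc2, if_neg (by rw [hc2]; exact Ne.symm hne)]
              simpa using pvPair_symm h')
            (by rw [hbest]; split_ifs <;> omega)
          exact this
        · -- a third type: A shrinks the window to [bs, j], B moves start to bs
          rw [if_pos (pvPair_not_contains hp hc2 hc1)]
          have hshrink := pv_shrink_eq a j bs t1 t2 hbsj hrun hprev hne
            a.length s d (by omega) (by omega) h5 (fun _ => hp)
            (fun h => absurd h (by omega))
          rw [hshrink]
          have hz : pvCnt a (PySem.List.pyGetD a j 0) bs j = 0 :=
            pvCnt_all_ne a t1 _ hc1 (j - bs).toNat bs j (by omega) hrun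
          have hrunlen : pvCnt a t1 bs j = j - bs :=
            pvCnt_all a t1 (j - bs).toNat bs j (by omega) hrun
          simp only [ne_eq, if_pos (show ¬PySem.List.pyGetD a j 0 = t1 from hc1),
            if_pos (show (¬PySem.List.pyGetD a j 0 = t1) ∧ (¬PySem.List.pyGetD a j 0 = t2) ∧ ¬t2 = t1
              from ⟨hc1, hc2, fun h => hne h.symm⟩)]
          have := pv_main_eq a fuel (j + 1) bs j (PySem.List.pyGetD a j 0) t1 (max maxp (j - s))
            (if best < j - bs + 1 then j - bs + 1 else best)
            ((PySem.Dict.mk [(t1, pvCnt a t1 bs j)]).insert (PySem.List.pyGetD a j 0) 1)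
            (by omega) (by omega) (by omega) (by omega) (by omega)
            (fun k hk1 hk2 => by
              have : k = j := by omega
              rw [this])
            (by
              have : j - 1 < j := by omega
              rw [hrun (j - 1) (by omega) this])
            hc1
            (fun k hk1 hk2 => by
              rcases eq_or_lt_of_le (show k ≤ j by omega) with h | h
              · rw [h]; exact Or.inl rfl
              · exact Or.inr (hrun k hk1 (by omega)))
            (by
              have h' := pvPair_of_insert (pvCnt a t1 bs j) hc1
              have e1 : pvCnt a t1 bs (j + 1) = pvCnt a t1 bs j := by
                rw [pvCnt_snoc a t1 bs j (by omega), if_neg hc1]; ring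
              have e2 : pvCnt a (PySem.List.pyGetD a j 0) bs (j + 1) = 1 := by
                rw [pvCnt_snoc a _ bs j (by omega), if_pos rfl, hz]; ring
              rw [e1, e2]
              exact h')
            (by rw [hbest]; split_ifs <;> omega)
          exact this
-- A's first loop when every element equals a0 : it runs off the end
lemma pvA_phase1_all (a : List Int) (a0 : Int)
    (hall : ∀ k, 0 ≤ k → k < (a.length : Int) → PySem.List.pyGetD a k 0 = a0) :
    ∀ (kN : Nat) (j : Int), 1 ≤ j → j ≤ (a.length : Int) → ((a.length : Int) - j).toNat = kN →
      ∃ d, pvA_phase1 a (PySem.List.pyRange j (a.length : Int) 1) (PySem.Dict.mk [(a0, j)])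
        = (d, none)
  | 0, j, hj1, hjn, hk => by
      rw [PySem.List.pyRange_one_eq_nil (by omega), pvA_phase1]
      exact ⟨_, rfl⟩
  | kN+1, j, hj1, hjn, hk => by
      rw [PySem.List.pyRange_one_cons (by omega), pvA_phase1,
          if_pos (by simp [PySem.Dict.contains_mk, hall j (by omega) (by omega)])]
      have hmod : (PySem.Dict.mk [(a0, j)]).modify (PySem.List.pyGetD a j 0) 0 (· + 1)
          = PySem.Dict.mk [(a0, j + 1)] := by
        rw [hall j (by omega) (by omega)]
        simp [PySem.Dict.modify, PySem.Dict.ext_iff, PySem.Dict.items_insert,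
              PySem.Dict.getD_eq_get?_getD, PySem.Dict.get?_mk_cons]
      rw [hmod]
      exact pvA_phase1_all a a0 hall kN (j + 1) (by omega) (by omega) (by omega)

-- A's first loop otherwise : it breaks at the first mismatch m with the dict = {a0: m}
lemma pvA_phase1_mismatch (a : List Int) (a0 m : Int) (hmn : m < (a.length : Int))
    (hm : PySem.List.pyGetD a m 0 ≠ a0)
    (hall : ∀ k, 0 ≤ k → k < m → PySem.List.pyGetD a k 0 = a0) :
    ∀ (kN : Nat) (j : Int), 1 ≤ j → j ≤ m → (m - j).toNat = kN →
      pvA_phase1 a (PySem.List.pyRange j (a.length : Int) 1) (PySem.Dict.mk [(a0, j)])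
        = (PySem.Dict.mk [(a0, m)], some m)
  | 0, j, hj1, hjm, hk => by
      have hjm' : j = m := by omega
      subst hjm'
      rw [PySem.List.pyRange_one_cons (by omega), pvA_phase1,
          if_neg (by simp [PySem.Dict.contains_mk]; exact fun h => hm h.symm)]
  | kN+1, j, hj1, hjm, hk => by
      rw [PySem.List.pyRange_one_cons (by omega), pvA_phase1,
          if_pos (by simp [PySem.Dict.contains_mk, hall j (by omega) (by omega)])]
      have hmod : (PySem.Dict.mk [(a0, j)]).modify (PySem.List.pyGetD a j 0) 0 (· + 1)
          = PySem.Dict.mk [(a0, j + 1)] := by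
        rw [hall j (by omega) (by omega)]
        simp [PySem.Dict.modify, PySem.Dict.ext_iff, PySem.Dict.items_insert,
              PySem.Dict.getD_eq_get?_getD, PySem.Dict.get?_mk_cons]
      rw [hmod]
      exact pvA_phase1_mismatch a a0 m hmn hm hall kN (j + 1) (by omega) (by omega) (by omega)

-- B's loop over the leading run of a0 only grows the window and the best length
lemma pvB_prefix (a : List Int) (a0 m : Int) (hmn : m ≤ (a.length : Int))
    (hall : ∀ k, 0 ≤ k → k < m → PySem.List.pyGetD a k 0 = a0) :
    ∀ (kN : Nat) (j : Int), 1 ≤ j → j ≤ m → (m - j).toNat = kN →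
      pvB_loop a (PySem.List.pyRange j (a.length : Int) 1) a0 a0 0 0 j
        = pvB_loop a (PySem.List.pyRange m (a.length : Int) 1) a0 a0 0 0 m
  | 0, j, hj1, hjm, hk => by
      have : j = m := by omega
      rw [this]
  | kN+1, j, hj1, hjm, hk => by
      rw [PySem.List.pyRange_one_cons (by omega), pvB_loop]
      rw [hall j (by omega) (by omega)]
      simp only [ne_eq, not_true_eq_false, false_and, if_false, ite_self]
      rw [if_pos (by omega), show j - 0 + 1 = j + 1 by ring]
      exact pvB_prefix a a0 m hmn hall kN (j + 1) (by omega) (by omega) (by omega)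

-- ===== VERDICT (by name: the statement is the Claim_ definition above) =====
theorem get_longest_path_length_spec : Claim_equal_get_longest_path_length := by
  intro apples _ hpre
  unfold Spec_get_longest_path_length
  cases apples with
  | nil => exact absurd rfl hpre
  | cons a0 rest =>
    have hlen : (a0 :: rest).length = rest.length + 1 := rfl
    simp only [get_longest_path_length, get_longest_path_length_alt,
      PySem.List.pyGet?_zero_cons, PySem.List.len_eq]
    have hinit : (PySem.Dict.empty : PySem.Dict Int Int).insert a0 1 = PySem.Dict.mk [(a0, 1)] := by
      simp [PySem.Dict.ext_iff, PySem.Dict.items_insert, PySem.Dict.empty]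
    rw [hinit]
    have hget0 : PySem.List.pyGetD (a0 :: rest) 0 0 = a0 := PySem.List.pyGetD_zero_cons a0 rest 0
    by_cases hall : ∀ k : Int, 0 ≤ k → k < (((a0 :: rest).length : Nat) : Int) →
        PySem.List.pyGetD (a0 :: rest) k 0 = a0
    · -- only one type of apple
      obtain ⟨d, hd⟩ := pvA_phase1_all (a0 :: rest) a0 hall
        ((((a0 :: rest).length : Int) - 1).toNat) 1 le_rfl (by omega) rfl
      rw [hd, pvB_prefix (a0 :: rest) a0 (((a0 :: rest).length : Nat) : Int) le_rfl hall
            ((((a0 :: rest).length : Int) - 1).toNat) 1 le_rfl (by omega) rfl,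
          PySem.List.pyRange_one_eq_nil le_rfl, pvB_loop]
    · -- a second type exists; m = first index with a different type
      push_neg at hall
      obtain ⟨k0, hk00, hk01, hk02⟩ := hall
      have hPex : ∃ kk : Nat, ((kk : Int) < (((a0 :: rest).length : Nat) : Int) ∧
          PySem.List.pyGetD (a0 :: rest) (kk : Int) 0 ≠ a0) :=
        ⟨k0.toNat, by rw [Int.toNat_of_nonneg hk00]; exact ⟨hk01, hk02⟩⟩
      obtain ⟨hmlt, hmne⟩ := Nat.find_spec hPex
      have hm1 : 1 ≤ ((Nat.find hPex : Nat) : Int) := by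
        rcases Nat.eq_zero_or_pos (Nat.find hPex) with h0 | h0
        · exfalso
          apply hmne
          rw [h0, Nat.cast_zero]
          exact hget0
        · omega
      have hall' : ∀ k : Int, 0 ≤ k → k < ((Nat.find hPex : Nat) : Int) →
          PySem.List.pyGetD (a0 :: rest) k 0 = a0 := by
        intro k h0 hk
        have hklt : k.toNat < Nat.find hPex := by omega
        have h := Nat.find_min hPex hklt
        by_contra hne
        exact h ⟨by omega, by rw [Int.toNat_of_nonneg h0]; exact hne⟩
      rw [pvA_phase1_mismatch (a0 :: rest) a0 ((Nat.find hPex : Nat) : Int) hmlt hmne hall'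
            ((((Nat.find hPex : Nat) : Int) - 1).toNat) 1 le_rfl hm1 rfl,
          pvB_prefix (a0 :: rest) a0 ((Nat.find hPex : Nat) : Int) (le_of_lt hmlt) hall'
            ((((Nat.find hPex : Nat) : Int) - 1).toNat) 1 le_rfl hm1 rfl,
          PySem.List.pyRange_one_cons hmlt, pvB_loop]
      simp only [ne_eq, hmne, not_false_eq_true, eq_self_iff_true, not_true_eq_false, and_false,
        false_and, and_true, true_and, if_true, if_false, sub_zero]
      rw [if_pos (show ((Nat.find hPex : Nat) : Int) < ((Nat.find hPex : Nat) : Int) + 1 by omega)]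
      have hcnt0 : pvCnt (a0 :: rest) a0 0 ((Nat.find hPex : Nat) : Int) =
          ((Nat.find hPex : Nat) : Int) :=  by
        have := pvCnt_all (a0 :: rest) a0 (Nat.find hPex) 0 ((Nat.find hPex : Nat) : Int)
          (by omega) (fun x h1 h2 => hall' x h1 h2)
        omega
      have hcntc : pvCnt (a0 :: rest) (PySem.List.pyGetD (a0 :: rest) ((Nat.find hPex : Nat) : Int) 0)
          0 ((Nat.find hPex : Nat) : Int) = 0 :=
        pvCnt_all_ne (a0 :: rest) a0 _ hmne (Nat.find hPex) 0 _ (by omega) (fun x h1 h2 => hall' x h1 h2)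
      have hmain := pv_main_eq (a0 :: rest)
        ((((a0 :: rest).length : Int) - (((Nat.find hPex : Nat) : Int) + 1)).toNat)
        (((Nat.find hPex : Nat) : Int) + 1) 0 ((Nat.find hPex : Nat) : Int)
        (PySem.List.pyGetD (a0 :: rest) ((Nat.find hPex : Nat) : Int) 0) a0
        0 (((Nat.find hPex : Nat) : Int) - 0 + 1)
        ((PySem.Dict.mk [(a0, ((Nat.find hPex : Nat) : Int))]).insert
          (PySem.List.pyGetD (a0 :: rest) ((Nat.find hPex : Nat) : Int) 0) 1)
        le_rfl le_rfl (by omega) (by omega) (by omega)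
        (fun k hk1 hk2 => by have : k = ((Nat.find hPex : Nat) : Int) := by omega
                             rw [this])
        (hall' _ (by omega) (by omega))
        hmne
        (fun k hk1 hk2 => by
          rcases eq_or_lt_of_le (show k ≤ ((Nat.find hPex : Nat) : Int) by omega) with h | h
          · rw [h]; exact Or.inl rfl
          · exact Or.inr (hall' k hk1 (by omega)))
        (by
          have h' := pvPair_of_insert ((Nat.find hPex : Nat) : Int) hmne
          have e1 : pvCnt (a0 :: rest) a0 0 (((Nat.find hPex : Nat) : Int) + 1)
              = ((Nat.find hPex : Nat) : Int) := by
            rw [pvCnt_snoc _ _ _ _ (by omega), if_neg hmne, hcnt0]; ring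
          have e2 : pvCnt (a0 :: rest)
              (PySem.List.pyGetD (a0 :: rest) ((Nat.find hPex : Nat) : Int) 0)
              0 (((Nat.find hPex : Nat) : Int) + 1) = 1 := by
            rw [pvCnt_snoc _ _ _ _ (by omega), if_pos rfl, hcntc]; ring
          rw [e1, e2]
          exact h')
        (by omega)
      simp only [sub_zero] at hmain ⊢
      exact hmain
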